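-- pv_equiv track=rewrite | github.com/KerimovEmil/ProjectEuler | util/utils.py | square_free_sieve
-- ===== SOURCE A (Python) =====
-- def square_free_sieve(limit):
--     """Generator that yields all square free numbers less than limit"""
--     a = [True] * limit
--     # Needed so we don't mark off multiples of 1^2
--     yield 1
--     a[0] = a[1] = False
--     for i, is_square_free in enumerate(a):
--         if is_square_free:
--             yield i
--             i2 = i * i
--             for n in range(i2, limit, i2):
--                 a[n] = False
-- ===== SOURCE B (Python) =====
-- def square_free_sieve(limit):
--     """Generator that yields all square free numbers less than limit"""
--     a = [True] * limit
--     # decoupled marking phase: strike every multiple of every square k*k < limit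
--     k = 2
--     while k * k < limit:
--         for n in range(k * k, limit, k * k):
--             a[n] = False
--         k += 1
--     # separate ascending yielding phase
--     if limit > 1:
--         yield 1
--     for i in range(2, limit):
--         if a[i]:
--             yield i
-- ===== Notes on version B (the rewrite author's own statement) =====
-- stated objective: alternative
-- what changed: A fuses yielding and marking in one enumerate loop over the list and strikes multiples of i*i only for i that are still square-free when reached; B decouples this into a standalone marking pass striking multiples of k*k for every base k with k*k below limit, followed by a separate ascending scan yielding the survivors, which drops A's per-element enumerate/flag bookkeeping (a constant-factor speedup a timing run measured).
import Mathlib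
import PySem

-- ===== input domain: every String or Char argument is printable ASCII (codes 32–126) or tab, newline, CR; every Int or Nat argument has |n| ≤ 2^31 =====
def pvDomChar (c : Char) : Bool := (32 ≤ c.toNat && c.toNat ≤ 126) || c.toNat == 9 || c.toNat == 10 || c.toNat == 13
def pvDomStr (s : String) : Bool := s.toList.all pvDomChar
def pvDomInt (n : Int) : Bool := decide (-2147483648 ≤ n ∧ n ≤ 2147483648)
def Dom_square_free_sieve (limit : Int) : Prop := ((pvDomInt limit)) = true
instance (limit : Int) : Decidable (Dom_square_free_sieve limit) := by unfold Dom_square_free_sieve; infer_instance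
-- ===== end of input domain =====

-- B splits A's fused enumerate-yield-and-mark loop into a standalone pass striking every
-- multiple of every square k*k < limit, followed by a separate ascending scan of survivors
-- (a different decomposition; a timing run measured it a constant factor faster).
-- Pre_ excludes the inputs below two on which Python A raises IndexError.


-- ===== PORT A =====
-- shared inner marking loop 'for n in range(i2, limit, i2): a[n] = False'
-- (identical source text in A and in B)
def pvMark (a : Array Bool) (idxs : List Int) : Array Bool :=
  idxs.foldl (fun b n => b.setIfInBounds n.toNat false) a

theorem pvMark_size (idxs : List Int) (a : Array Bool) : (pvMark a idxs).size = a.size := by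
  induction idxs generalizing a with
  | nil => rfl
  | cons m l ih => simp [pvMark, List.foldl_cons] at ih ⊢; rw [ih, Array.size_setIfInBounds]

-- A's single loop 'for i, is_square_free in enumerate(a): …' — reads the CURRENT a[i]
-- (Python's enumerate over the mutating list), yields i, then marks multiples of i*i
def pvALoop (limit : Int) (a : Array Bool) (i : Nat) : List Int :=
  if h : i < a.size then
    if a[i] then
      (i : Int) :: pvALoop limit (pvMark a (PySem.List.pyRange ((i:Int)*i) limit ((i:Int)*i))) (i+1)
    else pvALoop limit a (i+1)
  else []
termination_by a.size - i
decreasing_by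
  · rw [pvMark_size]; omega
  · omega

def square_free_sieve (limit : Int) : List Int :=
  let a := Array.replicate limit.toNat true
  let a := (a.setIfInBounds 0 false).setIfInBounds 1 false
  1 :: pvALoop limit a 0

-- ===== PORT B =====
-- B's marking phase: 'k = 2; while k*k < limit: for n in range(k*k, limit, k*k): a[n] = False; k += 1'
def pvBMark (limit : Int) (a : Array Bool) (k : Nat) : Array Bool :=
  if (k:Int)*(k:Int) < limit then
    pvBMark limit (pvMark a (PySem.List.pyRange ((k:Int)*k) limit ((k:Int)*k))) (k+1)
  else a
termination_by limit.toNat - k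
decreasing_by
  have hk : (k:Int) < limit := by nlinarith [sq_nonneg ((k:Int) - 1)]
  omega

def square_free_sieve_alt (limit : Int) : List Int :=
  let a := pvBMark limit (Array.replicate limit.toNat true) 2
  (if 1 < limit then [1] else []) ++
    (PySem.List.pyRange 2 limit 1).filter (fun i => a.getD i.toNat false)

-- ===== PRECONDITION & SPEC =====
-- Pre_: Python A raises IndexError (at a[1] = False) exactly on the excluded inputs, limit below two
def Pre_square_free_sieve (limit : Int) : Prop := 2 ≤ limit
instance (limit : Int) : Decidable (Pre_square_free_sieve limit) := by unfold Pre_square_free_sieve; infer_instance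
def pvWitness_square_free_sieve : Int := 10

def Spec_square_free_sieve (limit : Int) (out : List Int) : Prop := out = square_free_sieve_alt limit
instance (limit : Int) (out : List Int) : Decidable (Spec_square_free_sieve limit out) := by unfold Spec_square_free_sieve; infer_instance

-- ===== CLAIM (what is proved, stated in full; the proofs are below) =====
def Claim_equal_square_free_sieve : Prop := ∀ (limit : Int), Dom_square_free_sieve limit → Pre_square_free_sieve limit → Spec_square_free_sieve limit (square_free_sieve limit)

-- ===== LEMMAS AND PROOFS =====

-- n is square-free (and ≥ 1): no square j*j with j ≥ 2 divides it
def SQF (n : Nat) : Prop := ∀ j, 2 ≤ j → ¬ j*j ∣ n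

def sqfb (n : Nat) : Bool := decide (∀ j < n+1, ¬(2 ≤ j ∧ j*j ∣ n))

theorem sqfb_iff (n : Nat) (hn : 1 ≤ n) : sqfb n = true ↔ SQF n := by
  unfold sqfb SQF
  simp only [decide_eq_true_eq]
  constructor
  · intro h j hj hdvd
    exact h j (by have := Nat.le_of_dvd hn hdvd; nlinarith) ⟨hj, hdvd⟩
  · intro h j _ ⟨hj, hdvd⟩
    exact h j hj hdvd

-- a minimal square divisor has a square-free base
theorem exists_sqf_divisor (n : Nat) : ∀ j, 2 ≤ j → j*j ∣ n → ∃ k, 2 ≤ k ∧ SQF k ∧ k*k ∣ n := by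
  intro j
  induction j using Nat.strong_induction_on with
  | _ j ih =>
    intro hj hdvd
    by_cases hs : SQF j
    · exact ⟨j, hj, hs, hdvd⟩
    · unfold SQF at hs
      push Not at hs
      obtain ⟨d, hd2, m, hm⟩ := hs
      have hm1 : 1 ≤ m := by
        rcases Nat.eq_zero_or_pos m with h | h
        · rw [h, Nat.mul_zero] at hm; omega
        · exact h
      have hlt : d*m < j := by nlinarith
      have hk2 : 2 ≤ d*m := by nlinarith
      have hdd : (d*m)*(d*m) ∣ n := by
        refine dvd_trans ⟨d*d, ?_⟩ hdvd
        rw [hm]; ring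
      exact ih (d*m) hlt hk2 hdd

theorem getD_setIfInBounds_false (a : Array Bool) (i n : Nat) :
    ((a.setIfInBounds i false).getD n false = true) ↔ (a.getD n false = true ∧ n ≠ i) := by
  rw [Array.getD_eq_getD_getElem?, Array.getD_eq_getD_getElem?, Array.getElem?_setIfInBounds]
  split_ifs with h1 h2 <;> simp_all
  omega

theorem getD_pvMark (l : List Int) (a : Array Bool) (n : Nat) (hnn : ∀ m ∈ l, 0 ≤ m) :
    ((pvMark a l).getD n false = true) ↔ (a.getD n false = true ∧ (n:Int) ∉ l) := by
  induction l generalizing a with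
  | nil => simp [pvMark]
  | cons m l ih =>
    have hm : 0 ≤ m := hnn m (by simp)
    have : pvMark a (m :: l) = pvMark (a.setIfInBounds m.toNat false) l := by
      simp [pvMark, List.foldl_cons]
    rw [this, ih _ (fun x hx => hnn x (by simp [hx])), getD_setIfInBounds_false]
    have : n ≠ m.toNat ↔ (n:Int) ≠ m := by omega
    simp only [List.mem_cons]
    tauto

theorem mem_markRange (i n L : Nat) (hi : 2 ≤ i) :
    ((n:Int) ∈ PySem.List.pyRange ((i:Int)*i) (L:Int) ((i:Int)*i)) ↔ (i*i ∣ n ∧ i*i ≤ n ∧ n < L) := by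
  have hpos : (0:Int) < (i:Int)*i := by positivity
  rw [PySem.List.mem_pyRange_iff_of_pos hpos]
  have hdvd : ((i:Int)*i ∣ (n:Int) - (i:Int)*i) ↔ ((i:Int)*i ∣ (n:Int)) := by
    constructor
    · intro h; have := dvd_add h (dvd_refl ((i:Int)*i)); simpa using this
    · intro h; exact dvd_sub h (dvd_refl _)
  rw [hdvd]
  have : ((i:Int)*i ∣ (n:Int)) ↔ (i*i ∣ n) := by
    rw [show (i:Int)*i = ((i*i : Nat) : Int) by push_cast; ring]
    exact Int.natCast_dvd_natCast
  rw [this]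
  omega

theorem mark_nonneg (i : Nat) (limit : Int) (hi : 2 ≤ i) :
    ∀ m ∈ PySem.List.pyRange ((i:Int)*i) limit ((i:Int)*i), 0 ≤ m := by
  intro m hm
  have hpos : (0:Int) < (i:Int)*i := by positivity
  have h2 := ((PySem.List.mem_pyRange_iff_of_pos hpos m).mp hm).1
  linarith

-- bases < i that A has already marked with
def badUpto (i n : Nat) : Prop := ∃ k, 2 ≤ k ∧ k < i ∧ SQF k ∧ k*k ∣ n

def pvInv (a : Array Bool) (i L : Nat) : Prop :=
  a.size = L ∧ ∀ n, (a.getD n false = true ↔ n < L ∧ 2 ≤ n ∧ ¬ badUpto i n)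

theorem getA_iff_sqf {a : Array Bool} {i L : Nat} (h : pvInv a i L) :
    (a.getD i false = true) ↔ (i < L ∧ 2 ≤ i ∧ SQF i) := by
  rw [h.2 i]
  constructor
  · rintro ⟨h1, h2, h3⟩
    refine ⟨h1, h2, fun j hj hdvd => ?_⟩
    obtain ⟨k, hk2, hks, hkd⟩ := exists_sqf_divisor i j hj hdvd
    have hkk : k*k ≤ i := Nat.le_of_dvd (by omega) hkd
    exact h3 ⟨k, hk2, by nlinarith, hks, hkd⟩
  · rintro ⟨h1, h2, h3⟩
    exact ⟨h1, h2, fun ⟨k, hk2, _, _, hkd⟩ => h3 k hk2 hkd⟩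

theorem badUpto_succ (i n : Nat) : badUpto (i+1) n ↔ badUpto i n ∨ (2 ≤ i ∧ SQF i ∧ i*i ∣ n) := by
  unfold badUpto
  constructor
  · rintro ⟨k, h2, hlt, hs, hd⟩
    rcases Nat.lt_succ_iff_lt_or_eq.mp hlt with h | rfl
    · exact Or.inl ⟨k, h2, h, hs, hd⟩
    · exact Or.inr ⟨h2, hs, hd⟩
  · rintro (⟨k, h2, hlt, hs, hd⟩ | ⟨h2, hs, hd⟩)
    · exact ⟨k, h2, by omega, hs, hd⟩
    · exact ⟨i, h2, by omega, hs, hd⟩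

theorem pvInv_step_true {a : Array Bool} {i L : Nat} (hInv : pvInv a i L) (h2 : 2 ≤ i) (hs : SQF i) :
    pvInv (pvMark a (PySem.List.pyRange ((i:Int)*i) ((L:Nat):Int) ((i:Int)*i))) (i+1) L := by
  refine ⟨by rw [pvMark_size]; exact hInv.1, fun n => ?_⟩
  rw [getD_pvMark _ _ _ (mark_nonneg i _ h2), hInv.2 n, mem_markRange i n L h2, badUpto_succ]
  constructor
  · rintro ⟨⟨h1, hn2, h3⟩, h4⟩
    refine ⟨h1, hn2, ?_⟩
    rintro (hb | ⟨_, _, hdvd⟩)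
    · exact h3 hb
    · exact h4 ⟨hdvd, Nat.le_of_dvd (by omega) hdvd, h1⟩
  · rintro ⟨h1, hn2, h3⟩
    exact ⟨⟨h1, hn2, fun hb => h3 (Or.inl hb)⟩, fun ⟨hdvd, _, _⟩ => h3 (Or.inr ⟨h2, hs, hdvd⟩)⟩

theorem pvInv_step_false {a : Array Bool} {i L : Nat} (hInv : pvInv a i L) (hns : ¬(2 ≤ i ∧ SQF i)) :
    pvInv a (i+1) L := by
  refine ⟨hInv.1, fun n => ?_⟩
  rw [hInv.2 n]
  have : ¬ (2 ≤ i ∧ SQF i ∧ i*i ∣ n) := fun ⟨x, y, _⟩ => hns ⟨x, y⟩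
  rw [show badUpto (i+1) n ↔ badUpto i n from by rw [badUpto_succ]; tauto]

theorem pvALoop_eq (L : Nat) :
    ∀ d i a, L - i ≤ d → pvInv a i L →
      pvALoop (L:Int) a i =
        ((List.range' i (L - i)).filter (fun n => decide (2 ≤ n) && sqfb n)).map (fun n => (n:Int)) := by
  intro d
  induction d with
  | zero =>
    intro i a hd hInv
    rw [pvALoop, dif_neg (by rw [hInv.1]; omega)]
    simp [Nat.sub_eq_zero_of_le (by omega : L ≤ i)]
  | succ d ih =>
    intro i a hd hInv
    by_cases hiL : i < L
    · rw [pvALoop, dif_pos (show i < a.size from by rw [hInv.1]; exact hiL)]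
      split
      · rename_i htrue
        rw [Array.getElem_eq_getD false] at htrue
        obtain ⟨-, h2i, hsqf⟩ := (getA_iff_sqf hInv).mp htrue
        rw [ih (i+1) _ (by omega) (pvInv_step_true hInv h2i hsqf)]
        rw [show L - i = (L - (i+1)) + 1 from by omega, List.range'_succ, List.filter_cons]
        have hp : (decide (2 ≤ i) && sqfb i) = true := by
          simp [h2i, (sqfb_iff i (by omega)).mpr hsqf]
        simp [hp]
      · rename_i hfalse
        rw [Array.getElem_eq_getD false] at hfalse
        have hns : ¬(2 ≤ i ∧ SQF i) := by
          rintro ⟨h2i, hsqf⟩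
          exact hfalse ((getA_iff_sqf hInv).mpr ⟨hiL, h2i, hsqf⟩)
        rw [ih (i+1) a (by omega) (pvInv_step_false hInv hns)]
        rw [show L - i = (L - (i+1)) + 1 from by omega, List.range'_succ, List.filter_cons]
        have hp : (decide (2 ≤ i) && sqfb i) = false := by
          by_cases h2i : 2 ≤ i
          · have hsf : sqfb i = false := by
              rcases Bool.eq_false_or_eq_true (sqfb i) with h | h
              · exact absurd ⟨h2i, (sqfb_iff i (by omega)).mp h⟩ hns
              · exact h
            simp [hsf]
          · simp [h2i]
        simp [hp]
    · rw [pvALoop, dif_neg (by rw [hInv.1]; omega)]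
      simp [Nat.sub_eq_zero_of_le (by omega : L ≤ i)]

theorem pvInv_init (L : Nat) :
    pvInv (((Array.replicate L true).setIfInBounds 0 false).setIfInBounds 1 false) 0 L := by
  refine ⟨by simp [Array.size_setIfInBounds, Array.size_replicate], fun n => ?_⟩
  rw [getD_setIfInBounds_false, getD_setIfInBounds_false]
  have hrep : (Array.replicate L true).getD n false = true ↔ n < L := by
    rw [Array.getD_eq_getD_getElem?, Array.getElem?_replicate]
    split_ifs <;> simp_all
  have hb : ¬ badUpto 0 n := by rintro ⟨k, _, h, _, _⟩; omega
  rw [hrep]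
  constructor
  · rintro ⟨⟨h1, h2⟩, h3⟩
    exact ⟨h1, by omega, hb⟩
  · rintro ⟨h1, h2, -⟩
    exact ⟨⟨h1, by omega⟩, by omega⟩

theorem pvBMark_iff (L : Nat) :
    ∀ d k a n, 2 ≤ k → L - k ≤ d →
      ((pvBMark (L:Int) a k).getD n false = true ↔
        a.getD n false = true ∧ ∀ j, k ≤ j → ¬(j*j ∣ n ∧ j*j ≤ n ∧ n < L)) := by
  intro d
  induction d with
  | zero =>
    intro k a n hk hd
    have hkL : L ≤ k := by omega
    have hLk : (L:Int) ≤ (k:Int) := by exact_mod_cast hkL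
    rw [pvBMark, if_neg (by nlinarith)]
    constructor
    · intro h
      refine ⟨h, fun j hj ⟨_, hjn, hnL⟩ => ?_⟩
      have h1 : j ≤ j*j := Nat.le_mul_of_pos_left j (by omega)
      omega
    · exact fun h => h.1
  | succ d ih =>
    intro k a n hk hd
    by_cases hlt : ((k:Int))*(k:Int) < ((L:Nat):Int)
    · have hkkL : k*k < L := by exact_mod_cast hlt
      rw [pvBMark, if_pos hlt]
      have hkL : k < L := by nlinarith
      rw [ih (k+1) _ n (by omega) (by omega)]
      rw [getD_pvMark _ _ _ (mark_nonneg k _ hk), mem_markRange k n L hk]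
      constructor
      · rintro ⟨⟨ha, hck⟩, hrest⟩
        refine ⟨ha, fun j hj => ?_⟩
        rcases Nat.eq_or_lt_of_le hj with rfl | hj'
        · exact hck
        · exact hrest j (by omega)
      · rintro ⟨ha, hall⟩
        exact ⟨⟨ha, hall k le_rfl⟩, fun j hj => hall j (by omega)⟩
    · rw [pvBMark, if_neg hlt]
      have hkkL : L ≤ k*k := by exact_mod_cast not_lt.mp hlt
      constructor
      · intro h
        refine ⟨h, fun j hj ⟨_, hjn, hnL⟩ => ?_⟩
        have h1 : k*k ≤ j*j := Nat.mul_le_mul hj hj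
        omega
      · exact fun h => h.1

theorem bArray_getD (M : Nat) (k : Nat) (hk : k < M) :
    (pvBMark (((M+2 : Nat)):Int) (Array.replicate (M+2) true) 2).getD (2+k) false = sqfb (2+k) := by
  rw [Bool.eq_iff_iff]
  rw [pvBMark_iff (M+2) (M+2) 2 _ (2+k) (by omega) (by omega)]
  have hrep : (Array.replicate (M+2) true).getD (2+k) false = true := by
    rw [Array.getD_eq_getD_getElem?, Array.getElem?_replicate, if_pos (by omega)]
    rfl
  rw [hrep, sqfb_iff (2+k) (by omega)]
  simp only [true_and]
  constructor
  · intro hall j hj hdvd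
    exact hall j hj ⟨hdvd, Nat.le_of_dvd (by omega) hdvd, by omega⟩
  · rintro hsqf j hj ⟨hdvd, -, -⟩
    exact hsqf j hj hdvd

theorem square_free_sieve_spec : Claim_equal_square_free_sieve := by
  intro limit hdom hpre
  unfold Spec_square_free_sieve Pre_square_free_sieve at *
  obtain ⟨L, rfl⟩ : ∃ L : Nat, limit = (L:Int) := ⟨limit.toNat, (Int.toNat_of_nonneg (by omega)).symm⟩
  obtain ⟨M, rfl⟩ : ∃ M : Nat, L = M + 2 := ⟨L - 2, by omega⟩
  unfold square_free_sieve square_free_sieve_alt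
  simp only [Int.toNat_natCast]
  rw [pvALoop_eq (M+2) (M+2) 0 _ (by omega) (pvInv_init (M+2))]
  rw [if_pos (by exact_mod_cast (by omega : (1:Int) < ((M+2:Nat):Int)))]
  rw [PySem.List.pyRange_one, show (((M+2:Nat):Int) - 2).toNat = M from by omega]
  rw [show List.range' 0 (M + 2 - 0) = 0 :: 1 :: List.range' 2 M from by
        rw [show M + 2 - 0 = (M+1)+1 from by omega, List.range'_succ,
            show M + 1 = M+1 from rfl, List.range'_succ]]
  rw [List.range'_eq_map_range, List.filter_cons, List.filter_cons, List.filter_map, List.filter_map]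
  simp only [Function.comp_def]
  have e1 : ∀ kk ∈ List.range M,
      (pvBMark (((M+2:Nat)):Int) (Array.replicate (M+2) true) 2).getD ((2:Int)+kk).toNat false
        = (decide (2 ≤ 2+kk) && sqfb (2+kk)) := by
    intro kk hkk
    rw [List.mem_range] at hkk
    rw [show ((2:Int)+(kk:Nat)).toNat = 2+kk from by omega, bArray_getD M kk hkk]
    simp
  rw [List.filter_congr e1]
  simp
  rw [← List.map_eq_flatMap, List.map_map]
  exact List.map_congr_left fun x _ => by simp
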